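-- pv_equiv track=rewrite | github.com/ar-ianna/comp110-23s-workspace | quiz_practice/odd_and_even.py | odd_and_even
-- ===== SOURCE A (Python) =====
-- def odd_and_even(old:list[int]) -> list[int]:
--     """Return list with inputs that are odd with even index."""
--     new: list[int] = []
--     i: int = 0
--     while i < len(old):
--         if i % 2 == 0 and old[i] % 2 != 0:
--                 new.append(old[i])
--         i += 1
--     return new
-- ===== SOURCE B (Python) =====
-- def odd_and_even(old: list[int]) -> list[int]:
--     """Return list with inputs that are odd with even index."""
--     return [x for x in old[::2] if x % 2 != 0]
-- ===== Notes on version B (the rewrite author's own statement) =====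
-- stated objective: idiomatic
-- what changed: Replaces A's explicit index counter with a while loop and per-index parity guard by a stride-2 slice that selects the even-index elements first, followed by a single oddness filter.
import Mathlib
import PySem

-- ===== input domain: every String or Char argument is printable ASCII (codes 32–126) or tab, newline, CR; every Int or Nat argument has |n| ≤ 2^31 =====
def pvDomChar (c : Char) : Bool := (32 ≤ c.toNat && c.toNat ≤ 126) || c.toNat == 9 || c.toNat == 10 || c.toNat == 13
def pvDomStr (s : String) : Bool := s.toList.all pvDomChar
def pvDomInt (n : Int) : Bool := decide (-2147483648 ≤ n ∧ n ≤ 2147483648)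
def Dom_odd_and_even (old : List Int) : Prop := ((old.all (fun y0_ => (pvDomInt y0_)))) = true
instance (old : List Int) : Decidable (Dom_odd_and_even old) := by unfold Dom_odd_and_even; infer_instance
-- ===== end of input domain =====

-- B keeps only odd values among the even-index elements via a stride-2 slice then one filter
-- (A walks every index with a parity guard); same return value, no argument mutation in either.

-- ===== PORT A =====
-- A: while i < len(old): if i % 2 == 0 and old[i] % 2 != 0: new.append(old[i]); i += 1
def odd_and_even (old : List Int) : List Int :=
  (PySem.List.pyRange 0 (PySem.List.len old) 1).foldl
    (fun new i =>
      if PySem.Int.mod i 2 = 0 ∧ PySem.Int.mod (PySem.List.pyGetD old i 0) 2 ≠ 0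
      then new ++ [PySem.List.pyGetD old i 0] else new) []

-- ===== PORT B =====
-- B: [x for x in old[::2] if x % 2 != 0]   (old[::2] never fails: step 2 ≠ 0, so getD's default is unreachable)
def odd_and_even_alt (old : List Int) : List Int :=
  ((PySem.List.slice? old none none 2).getD []).filter
    (fun x => decide (PySem.Int.mod x 2 ≠ 0))

-- ===== PRECONDITION & SPEC =====
def Spec_odd_and_even (old : List Int) (out : List Int) : Prop := out = odd_and_even_alt old
instance (old : List Int) (out : List Int) : Decidable (Spec_odd_and_even old out) := by unfold Spec_odd_and_even; infer_instance

-- ===== CLAIM (what is proved, stated in full; the proofs are below) =====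
def Claim_equal_odd_and_even : Prop := ∀ (old : List Int), Dom_odd_and_even old → Spec_odd_and_even old (odd_and_even old)

-- ===== LEMMAS AND PROOFS =====

/-- The even-index elements of a list (what `old[::2]` selects). -/
def evenIdx : List Int → List Int
  | [] => []
  | [x] => [x]
  | x :: _ :: r => x :: evenIdx r

/-- A's loop, viewed over `enumerate`: starting at an even index, it appends exactly the
odd values among the even-index elements. -/
lemma foldA_enumerate (xs : List Int) : ∀ (s : Int) (acc : List Int), PySem.Int.mod s 2 = 0 →
    (PySem.List.enumerate xs s).foldl
      (fun new ix =>
        if PySem.Int.mod ix.1 2 = 0 ∧ PySem.Int.mod ix.2 2 ≠ 0 then new ++ [ix.2] else new) acc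
    = acc ++ (evenIdx xs).filter (fun x => decide (PySem.Int.mod x 2 ≠ 0)) := by
  induction xs using evenIdx.induct with
  | case1 => intro s acc _; simp [PySem.List.enumerate, evenIdx]
  | case2 x =>
      intro s acc hs
      have h2 : (0:Int) < 2 := by omega
      rw [PySem.Int.mod_eq_emod_of_pos h2] at hs
      have hsd : (2:Int) ∣ s := by omega
      simp only [PySem.List.enumerate, List.foldl, evenIdx, List.filter]
      by_cases hx : PySem.Int.mod x 2 = 0
      · rw [PySem.Int.mod_eq_emod_of_pos h2] at hx
        have hx0 : ¬ (x % 2 = 1) := by omega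
        simp [hsd, hx0]
      · rw [PySem.Int.mod_eq_emod_of_pos h2] at hx
        have hx1 : x % 2 = 1 := by omega
        simp [hsd, hx1]
  | case3 x y r ih =>
      intro s acc hs
      have h2 : (0:Int) < 2 := by omega
      rw [PySem.Int.mod_eq_emod_of_pos h2] at hs
      have hsd : (2:Int) ∣ s := by omega
      have h1 : ¬ ((2:Int) ∣ (s + 1)) := by omega
      have hnext : PySem.Int.mod (s + 1 + 1) 2 = 0 := by
        rw [PySem.Int.mod_eq_emod_of_pos h2]; omega
      simp only [PySem.List.enumerate, List.foldl, evenIdx, List.filter]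
      rw [ih (s + 1 + 1) _ hnext]
      by_cases hx : PySem.Int.mod x 2 = 0
      · rw [PySem.Int.mod_eq_emod_of_pos h2] at hx
        have hx0 : ¬ (x % 2 = 1) := by omega
        simp [hsd, hx0, h1]
      · rw [PySem.Int.mod_eq_emod_of_pos h2] at hx
        have hx1 : x % 2 = 1 := by omega
        simp [hsd, hx1, h1]

/-- The strided index walk of `slice?` with step 2 picks out the even-index sublist. -/
lemma filterMap_range_evenIdx (xs : List Int) :
    (List.range ((xs.length + 1) / 2)).filterMap (fun (k : Nat) => xs[(2 * (k : Int)).toNat]?)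
      = evenIdx xs := by
  induction xs using evenIdx.induct with
  | case1 => simp [evenIdx]
  | case2 x => simp [evenIdx]
  | case3 x y r ih =>
      have hc : ((x :: y :: r).length + 1) / 2 = (r.length + 1) / 2 + 1 := by
        simp only [List.length_cons]; omega
      rw [evenIdx, hc, List.range_succ_eq_map, List.filterMap_cons, List.filterMap_map]
      have h0 : ((2 : Int) * ((0 : Nat) : Int)).toNat = 0 := by omega
      simp only [h0, List.getElem?_cons_zero]
      rw [← ih]
      refine congrArg (List.cons x) (List.filterMap_congr ?_)
      intro k _
      have hidx : ((2 : Int) * ((k : Int) + 1)).toNat = (2 * (k : Int)).toNat + 2 := by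
        omega
      simp only [Function.comp, Nat.succ_eq_add_one, Nat.cast_add, Nat.cast_one, hidx,
        List.getElem?_cons_succ]

/-- `old[::2]` is exactly the even-index sublist. -/
lemma slice2_eq_evenIdx (xs : List Int) :
    PySem.List.slice? xs none none 2 = some (evenIdx xs) := by
  have h2 : ¬ ((2:Int) = 0) := by omega
  simp only [PySem.List.slice?, PySem.List.sliceIndices, if_neg h2]
  norm_num
  have hcount : (if 0 < xs.length then (((xs.length : Int) + 2 - 1) / 2).toNat else 0)
      = (xs.length + 1) / 2 := by split <;> omega
  rw [hcount]
  exact filterMap_range_evenIdx xs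

-- ===== VERDICT (by name: the statement is the Claim_ definition above) =====
theorem odd_and_even_spec : Claim_equal_odd_and_even := by
  intro old _
  show _ = _
  rw [odd_and_even_alt, slice2_eq_evenIdx]
  have henum := PySem.List.enumerate_eq_map_pyRange old 0
  calc odd_and_even old
      = (PySem.List.enumerate old 0).foldl
          (fun new ix =>
            if PySem.Int.mod ix.1 2 = 0 ∧ PySem.Int.mod ix.2 2 ≠ 0 then new ++ [ix.2] else new)
          [] := by
        rw [henum, List.foldl_map]; rfl
    _ = (evenIdx old).filter (fun x => decide (PySem.Int.mod x 2 ≠ 0)) := by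
        rw [foldA_enumerate old 0 [] (by decide)]; simp
    _ = (Option.getD (some (evenIdx old)) []).filter (fun x => decide (PySem.Int.mod x 2 ≠ 0)) := by
        simp
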